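-- pv_equiv track=rewrite | github.com/samwelkinuthia/snakey | samples/string_increment.py | inc
-- ===== SOURCE A (Python) =====
-- def inc(n):
--     x = []
--     p = []
--     for i in n:
--         if i.isdigit():
--             x.append(i)
--             n = n.replace(i, '')
--     for y in x:
--         if y is '0':
--             n = n + str(y)
--         else:
--             p.append(y)
--     p = ''.join(p)
--     p = int(p) + 1
--     return n + str(p)
-- ===== SOURCE B (Python) =====
-- def inc(n):
--     nondigits = ''.join(c for c in n if not c.isdigit())
--     zeros = ''.join(c for c in n if c == '0')
--     nonzeros = ''.join(c for c in n if c.isdigit() and c != '0')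
--     return nondigits + zeros + str(int(nonzeros) + 1)
-- ===== Notes on version B (the rewrite author's own statement) =====
-- stated objective: simpler
-- what changed: Replaces A's collect-digits loop with repeated full-string n.replace passes plus a second partitioning loop by three independent single-pass filters (non-digits, zeros, nonzero digits) concatenated directly.
import Mathlib
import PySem

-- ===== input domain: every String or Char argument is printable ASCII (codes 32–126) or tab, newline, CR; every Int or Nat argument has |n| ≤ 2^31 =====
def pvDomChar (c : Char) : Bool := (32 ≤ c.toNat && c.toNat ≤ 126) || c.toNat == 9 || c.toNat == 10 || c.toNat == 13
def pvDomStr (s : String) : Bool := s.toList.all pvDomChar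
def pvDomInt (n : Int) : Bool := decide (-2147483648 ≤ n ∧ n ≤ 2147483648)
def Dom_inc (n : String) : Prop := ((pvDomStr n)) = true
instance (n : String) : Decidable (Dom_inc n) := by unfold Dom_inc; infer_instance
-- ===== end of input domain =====

-- B replaces A's repeated n.replace passes and two-stage partition by three single-pass filters.

-- ===== PORT A =====
-- literal transliteration: the first loop collects digit chars into x and strips each from n via
-- n.replace(i, <empty>); the second loop appends zeros to n and collects the rest into p; int(p)
-- raises (ValueError) when p is empty, which Pre_inc excludes — the `none` branch below is
-- only a totality guard for that excluded case.
def incStep1 (st : List Char × String) (i : Char) : List Char × String :=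
  if PySem.Chars.isdigit i then
    (st.1 ++ [i], PySem.Str.replace st.2 (String.ofList [i]) "")
  else st

def incStep2 (st : String × List Char) (y : Char) : String × List Char :=
  if y == '0' then (st.1 ++ String.ofList [y], st.2)
  else (st.1, st.2 ++ [y])

def inc (n : String) : String :=
  let st := n.toList.foldl incStep1 ([], n)
  let st2 := st.1.foldl incStep2 (st.2, [])
  let p := String.ofList st2.2
  match PySem.Int.ofStr? p with
  | some v => st2.1 ++ PySem.Int.toStr (v + 1)
  | none => ""

-- ===== PORT B =====
def inc_alt (n : String) : String :=
  let nondigits := String.ofList (n.toList.filter (fun c => !(PySem.Chars.isdigit c)))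
  let zeros := String.ofList (n.toList.filter (fun c => c == '0'))
  let nonzeros := String.ofList (n.toList.filter (fun c => PySem.Chars.isdigit c && c != '0'))
  match PySem.Int.ofStr? nonzeros with
  | some v => nondigits ++ zeros ++ PySem.Int.toStr (v + 1)
  | none => ""

-- ===== PRECONDITION & SPEC =====
-- Pre_ excludes exactly the inputs with no nonzero digit, on which A's int() call raises
-- ValueError on an empty digit string (B raises there too).
def Pre_inc (n : String) : Prop :=
  (n.toList.any (fun c => PySem.Chars.isdigit c && c != '0')) = true
instance (n : String) : Decidable (Pre_inc n) := by unfold Pre_inc; infer_instance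
def pvWitness_inc : String := "a01b2"
def Spec_inc (n : String) (out : String) : Prop := out = inc_alt n
instance (n : String) (out : String) : Decidable (Spec_inc n out) := by unfold Spec_inc; infer_instance

-- ===== CLAIM (what is proved, stated in full; the proofs are below) =====
def Claim_equal_inc : Prop := ∀ (n : String), Dom_inc n → Pre_inc n → Spec_inc n (inc n)

-- ===== LEMMAS AND PROOFS =====

-- replace.go removing a single character is a filter
theorem replace_go_char (c : Char) :
    ∀ (l : List Char) (fuel : Nat) (acc : List Char), l.length ≤ fuel →
      PySem.Chars.replace.go [c] [] fuel l acc = acc.reverse ++ l.filter (fun x => x != c) := by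
  intro l
  induction l with
  | nil =>
    intro fuel acc _
    cases fuel <;> simp [PySem.Chars.replace.go]
  | cons a t ih =>
    intro fuel acc h
    cases fuel with
    | zero => simp at h
    | succ f =>
      by_cases hac : a = c
      · subst hac
        simp only [PySem.Chars.replace.go, List.isPrefixOf, beq_self_eq_true, Bool.true_and,
          if_true, List.length_cons, List.drop_succ_cons,
          List.length_nil, List.drop_zero, List.reverse_nil, List.nil_append]
        rw [ih f acc (by simpa using h)]
        simp
      · simp only [PySem.Chars.replace.go]
        rw [if_neg (by simp [List.isPrefixOf, Ne.symm hac])]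
        rw [ih f (a :: acc) (by simpa using h)]
        simp [hac]

theorem replace_char_toList (s : String) (c : Char) :
    (PySem.Str.replace s (String.ofList [c]) "").toList = s.toList.filter (fun x => x != c) := by
  rw [PySem.Str.toList_replace]
  have h1 : (String.ofList [c]).toList = [c] := by simp
  have h0 : ("" : String).toList = [] := by decide
  rw [h1, h0]
  simp only [PySem.Chars.replace, List.isEmpty_cons]
  exact replace_go_char c s.toList s.toList.length [] (le_refl _)

-- characterisation of A's first loop
theorem loopA (l : List Char) : ∀ (x0 : List Char) (s : String),
    (l.foldl incStep1 (x0, s)).1 = x0 ++ l.filter PySem.Chars.isdigit ∧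
    (l.foldl incStep1 (x0, s)).2.toList
      = s.toList.filter (fun c => !(PySem.Chars.isdigit c && l.contains c)) := by
  induction l with
  | nil => intro x0 s; simp
  | cons i t ih =>
    intro x0 s
    rw [List.foldl_cons]
    by_cases hd : PySem.Chars.isdigit i = true
    · have hstep : incStep1 (x0, s) i
          = (x0 ++ [i], PySem.Str.replace s (String.ofList [i]) "") := by
        simp [incStep1, hd]
      rw [hstep]
      obtain ⟨h1, h2⟩ := ih (x0 ++ [i]) (PySem.Str.replace s (String.ofList [i]) "")
      refine ⟨by simp [h1, hd], ?_⟩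
      rw [h2, replace_char_toList, List.filter_filter]
      apply List.filter_congr
      intro c _
      by_cases hc : c = i
      · subst hc; simp [hd]
      · simp [hc]
    · have hstep : incStep1 (x0, s) i = (x0, s) := by simp [incStep1, hd]
      rw [hstep]
      obtain ⟨h1, h2⟩ := ih x0 s
      refine ⟨by simp [h1, hd], ?_⟩
      rw [h2]
      apply List.filter_congr
      intro c _
      by_cases hc : c = i
      · subst hc; simp [hd]
      · simp [hc]

-- characterisation of A's second loop
theorem loopB (l : List Char) : ∀ (s0 : String) (p0 : List Char),
    (l.foldl incStep2 (s0, p0)).1.toList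
      = s0.toList ++ l.filter (fun y => y == '0') ∧
    (l.foldl incStep2 (s0, p0)).2
      = p0 ++ l.filter (fun y => !(y == '0')) := by
  induction l with
  | nil => intro s0 p0; simp
  | cons y t ih =>
    intro s0 p0
    rw [List.foldl_cons]
    by_cases hy : y = '0'
    · subst hy
      have hstep : incStep2 (s0, p0) '0' = (s0 ++ String.ofList ['0'], p0) := by
        simp [incStep2]
      rw [hstep]
      obtain ⟨h1, h2⟩ := ih (s0 ++ String.ofList ['0']) p0
      exact ⟨by rw [h1]; simp, by rw [h2]; simp⟩
    · have hstep : incStep2 (s0, p0) y = (s0, p0 ++ [y]) := by simp [incStep2, hy]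
      rw [hstep]
      obtain ⟨h1, h2⟩ := ih s0 (p0 ++ [y])
      exact ⟨by rw [h1]; simp [hy], by rw [h2]; simp [hy]⟩

-- ===== VERDICT (by name: the statement is the Claim_ definition above) =====
theorem inc_spec : Claim_equal_inc := by
  intro n _ _
  show inc n = inc_alt n
  obtain ⟨hx, hn⟩ := loopA n.toList [] n
  obtain ⟨g1, g2⟩ := loopB (n.toList.foldl incStep1 ([], n)).1
      (n.toList.foldl incStep1 ([], n)).2 []
  have hxval : (n.toList.foldl incStep1 ([], n)).1
      = n.toList.filter PySem.Chars.isdigit := by simpa using hx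
  -- the three pieces of A coincide with B's three filters
  have hp : (((n.toList.foldl incStep1 ([], n)).1).foldl incStep2
        ((n.toList.foldl incStep1 ([], n)).2, [])).2
      = n.toList.filter (fun c => PySem.Chars.isdigit c && c != '0') := by
    rw [g2, hxval, List.filter_filter]
    simp only [List.nil_append]
    apply List.filter_congr
    intro c _
    by_cases hc : c = '0'
    · subst hc; decide
    · simp [bne, Bool.and_comm]
  have hnval : (n.toList.foldl incStep1 ([], n)).2.toList
      = n.toList.filter (fun c => !(PySem.Chars.isdigit c)) := by
    rw [hn]
    apply List.filter_congr
    intro c hc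
    simp [hc]
  have hzeros : ((n.toList.foldl incStep1 ([], n)).1).filter (fun y => y == '0')
      = n.toList.filter (fun c => c == '0') := by
    rw [hxval, List.filter_filter]
    apply List.filter_congr
    intro c _
    by_cases hc : c = '0'
    · subst hc; decide
    · simp [hc]
  have hs1 : (((n.toList.foldl incStep1 ([], n)).1).foldl incStep2
        ((n.toList.foldl incStep1 ([], n)).2, [])).1.toList
      = n.toList.filter (fun c => !(PySem.Chars.isdigit c))
        ++ n.toList.filter (fun c => c == '0') := by
    rw [g1, hnval, hzeros]
  simp only [inc, inc_alt]
  rw [hp]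
  cases hofs : PySem.Int.ofStr?
      (String.ofList (n.toList.filter (fun c => PySem.Chars.isdigit c && c != '0'))) with
  | none => rfl
  | some v =>
    apply String.toList_inj.mp
    simp only [String.toList_append]
    rw [hs1]
    simp
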